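-- pv_equiv track=rewrite | github.com/aszxvcb/TIL | 프로그래머스/lv2_기능개발.py | solution
-- ===== SOURCE A (Python) =====
-- from collections import deque
--
-- def solution(progresses, speeds):
--     answer = []
--
--     deq_progresses = deque(progresses)
--     deq_speeds = deque(speeds)
--
--     while(len(deq_progresses) != 0):
--         for i in range(0, len(deq_progresses)):
--             deq_progresses[i] += deq_speeds[i]
--
--         cnt = 0
--         while( len(deq_progresses) != 0 and deq_progresses[0] >= 100 ):
--             cnt += 1
--             deq_progresses.popleft()
--             deq_speeds.popleft()
--         if( cnt != 0 ):
--             answer.append(cnt)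
--
--     return answer
-- ===== SOURCE B (Python) =====
-- def solution(progresses, speeds):
--     # Closed-form: days-to-finish per task via ceiling division, then one pass
--     # grouping consecutive tasks whose deadline does not exceed the group leader's.
--     answer = []
--     cur = 0
--     for p, s in zip(progresses, speeds):
--         d = 1 if s <= 0 or p + s >= 100 else -((p - 100) // s)
--         if not answer or d > cur:
--             answer.append(1)
--             cur = d
--         else:
--             answer[-1] += 1
--     return answer
-- ===== Notes on version B (the rewrite author's own statement) =====
-- stated objective: faster
-- what changed: B replaces A's day-by-day deque simulation (increment every remaining task each day, pop finished prefix) by computing each task's finish day with one ceiling division and grouping tasks in a single pass by their running group-leader deadline.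
-- outside the precondition, e.g. on solution([-5], [200]): A returns [1], B returns [1]; on solution([100], [0]): A returns [1], B returns [1]
import Mathlib
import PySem

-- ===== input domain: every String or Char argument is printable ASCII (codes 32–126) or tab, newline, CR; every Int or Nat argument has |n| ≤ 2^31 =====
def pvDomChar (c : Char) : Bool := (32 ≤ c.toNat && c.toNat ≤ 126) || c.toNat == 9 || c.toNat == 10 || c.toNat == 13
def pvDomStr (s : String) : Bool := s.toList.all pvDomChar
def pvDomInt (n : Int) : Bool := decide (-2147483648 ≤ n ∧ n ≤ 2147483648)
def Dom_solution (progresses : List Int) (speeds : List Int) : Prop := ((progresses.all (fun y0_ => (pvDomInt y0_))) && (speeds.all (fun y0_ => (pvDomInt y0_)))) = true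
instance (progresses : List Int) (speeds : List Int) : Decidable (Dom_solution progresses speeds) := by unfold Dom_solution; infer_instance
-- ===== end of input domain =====

-- B computes each task's finish day by one ceiling division and groups in a single
-- pass by the running group-leader deadline, instead of A's day-by-day simulation (faster, O(n)).


-- ===== PORT A =====
-- `for i in range(0, len(deq_progresses)): deq_progresses[i] += deq_speeds[i]`
-- (the case of fewer speeds than progresses is an IndexError in Python, outside Pre_)
def bumpA : List Int → List Int → List Int
  | [], _ => []
  | p :: ps, s :: ss => (p + s) :: bumpA ps ss
  | p :: ps, [] => p :: bumpA ps []  -- unreachable under Pre_ (Python raises IndexError)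

-- inner `while len(deq_progresses) != 0 and deq_progresses[0] >= 100: cnt += 1; popleft; popleft`
def popA : List Int → List Int → Int × List Int × List Int
  | [], ss => (0, [], ss)
  | p :: ps, s :: ss =>
      if 100 ≤ p then
        let r := popA ps ss
        (r.1 + 1, r.2)
      else (0, p :: ps, s :: ss)
  | p :: ps, [] => (0, p :: ps, [])  -- unreachable under Pre_ (Python raises IndexError)

-- outer `while len(deq_progresses) != 0`; the fuel only makes the loop total:
-- under Pre_ every task finishes within 100 days, so 200 iterations always suffice (proved below)
def loopA : Nat → List Int → List Int → List Int → List Int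
  | _, [], _, ans => ans
  | 0, _ :: _, _, ans => ans
  | fuel + 1, p :: ps, ss, ans =>
      let ps1 := bumpA (p :: ps) ss
      let r := popA ps1 ss
      let ans' := if r.1 ≠ 0 then ans ++ [r.1] else ans
      loopA fuel r.2.1 r.2.2 ans'

def solution (progresses : List Int) (speeds : List Int) : List Int :=
  loopA 200 progresses speeds []

-- ===== PORT B =====
-- `d = 1 if s <= 0 or p + s >= 100 else -((p - 100) // s)`
def daysB (p s : Int) : Int :=
  if s ≤ 0 ∨ 100 ≤ p + s then 1 else -(PySem.Int.floordiv (p - 100) s)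

-- `answer[-1] += 1` on the reversed accumulator
def incHead : List Int → List Int
  | [] => []
  | a :: as_ => (a + 1) :: as_

-- `for p, s in zip(...)` with state (answer reversed, cur)
def loopB : List (Int × Int) → List Int → Int → List Int
  | [], ans, _ => ans.reverse
  | x :: rest, ans, cur =>
      let d := daysB x.1 x.2
      if ans = [] ∨ cur < d then loopB rest (1 :: ans) d
      else loopB rest (incHead ans) cur

def solution_alt (progresses : List Int) (speeds : List Int) : List Int :=
  loopB (progresses.zip speeds) [] 0

-- ===== PRECONDITION & SPEC =====
-- Pre_ is the problem's natural domain: at least as many speeds as progresses (fewer is an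
-- IndexError in A), every progress ≥ 0 and every speed ≥ 1 (a speed ≤ 0 can make A loop forever,
-- and a far-negative progress makes A's simulation take unboundedly many iterations; the few
-- excluded inputs on which A still returns, e.g. progress ≥ 100 or progress + speed ≥ 100, are
-- listed as cites and B agrees with A there anyway).
def Pre_solution (progresses : List Int) (speeds : List Int) : Prop :=
  progresses.length ≤ speeds.length ∧ ∀ x ∈ progresses.zip speeds, 0 ≤ x.1 ∧ 1 ≤ x.2
instance (progresses : List Int) (speeds : List Int) : Decidable (Pre_solution progresses speeds) := by
  unfold Pre_solution; infer_instance

def pvWitness_solution : List Int × List Int := ([93, 30, 55], [1, 30, 5])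

def Spec_solution (progresses : List Int) (speeds : List Int) (out : List Int) : Prop := out = solution_alt progresses speeds
instance (progresses : List Int) (speeds : List Int) (out : List Int) : Decidable (Spec_solution progresses speeds out) := by unfold Spec_solution; infer_instance

-- ===== CLAIM (what is proved, stated in full; the proofs are below) =====
def Claim_equal_solution : Prop := ∀ (progresses : List Int) (speeds : List Int), Dom_solution progresses speeds → Pre_solution progresses speeds → Spec_solution progresses speeds (solution progresses speeds)

-- ===== LEMMAS AND PROOFS =====

def dB (x : Int × Int) : Int := daysB x.1 x.2

def ref : List (Int × Int) → List Int
  | [] => []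
  | x :: rest =>
      (1 + ((rest.takeWhile (fun y => decide (dB y ≤ dB x))).length : Int)) ::
        ref (rest.dropWhile (fun y => decide (dB y ≤ dB x)))
termination_by l => l.length
decreasing_by
  simp only [List.length_cons]
  exact Nat.lt_succ_of_le (List.length_dropWhile_le _ _)

def maxD : List (Int × Int) → Int
  | [] => 0
  | x :: l => max (dB x) (maxD l)

theorem days_bounds (x : Int × Int) (hp : 0 ≤ x.1) (hs : 1 ≤ x.2) :
    1 ≤ dB x ∧ dB x ≤ 100 := by
  obtain ⟨p, s⟩ := x
  simp only [dB, daysB]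
  split
  · omega
  · rename_i hcond
    push_neg at hcond
    simp only at hp hs hcond ⊢
    set q := PySem.Int.floordiv (p - 100) s with hqdef
    have hspos : (0:Int) < s := by omega
    have hq1 : q * s ≤ p - 100 := (PySem.Int.le_floordiv_iff_mul_le hspos).mp (le_refl q)
    have hq2 : p - 100 < (q + 1) * s :=
      (PySem.Int.floordiv_lt_iff_lt_mul hspos).mp (by omega)
    constructor
    · -- q ≤ -1
      by_contra hc
      push_neg at hc
      nlinarith
    · -- -q ≤ 100
      by_contra hc
      push_neg at hc
      nlinarith

theorem days_iff (x : Int × Int) (t : Int) (hp : 0 ≤ x.1) (hs : 1 ≤ x.2) (ht : 1 ≤ t) :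
    (100 ≤ x.1 + t * x.2) ↔ dB x ≤ t := by
  obtain ⟨p, s⟩ := x
  simp only [dB, daysB]
  split
  · rename_i hcond
    simp only at hp hs ⊢
    have hps : 100 ≤ p + s := by omega
    constructor
    · intro _; exact ht
    · intro _; nlinarith
  · rename_i hcond
    push_neg at hcond
    simp only at hp hs hcond ⊢
    set q := PySem.Int.floordiv (p - 100) s with hqdef
    have hspos : (0:Int) < s := by omega
    have hq1 : q * s ≤ p - 100 := (PySem.Int.le_floordiv_iff_mul_le hspos).mp (le_refl q)
    have hq2 : p - 100 < (q + 1) * s :=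
      (PySem.Int.floordiv_lt_iff_lt_mul hspos).mp (by omega)
    constructor
    · intro h
      by_contra hc
      push_neg at hc
      nlinarith
    · intro h
      nlinarith

theorem bumpA_map (t : Int) (l : List (Int × Int)) (rest : List Int) :
    bumpA (l.map (fun x => x.1 + t * x.2)) (l.map Prod.snd ++ rest)
      = l.map (fun x => x.1 + (t + 1) * x.2) := by
  induction l with
  | nil => simp [bumpA]
  | cons x l ih => simp [bumpA, ih]; ring

theorem popA_spec (u : Int) (l : List (Int × Int)) (rest : List Int)
    (h : ∀ x ∈ l, (100 ≤ x.1 + u * x.2) ↔ dB x ≤ u) :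
    popA (l.map (fun x => x.1 + u * x.2)) (l.map Prod.snd ++ rest)
      = (((l.takeWhile (fun y => decide (dB y ≤ u))).length : Int),
         (l.dropWhile (fun y => decide (dB y ≤ u))).map (fun x => x.1 + u * x.2),
         (l.dropWhile (fun y => decide (dB y ≤ u))).map Prod.snd ++ rest) := by
  induction l with
  | nil => simp [popA]
  | cons x l ih =>
      have hx := h x (by simp)
      by_cases hge : 100 ≤ x.1 + u * x.2
      · have hd : dB x ≤ u := hx.mp hge
        simp only [List.map_cons, List.cons_append, popA, if_pos hge]
        rw [ih (fun y hy => h y (by simp [hy]))]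
        simp [List.dropWhile_cons, hd]
      · have hd : ¬ dB x ≤ u := fun hc => hge (hx.mpr hc)
        simp only [List.map_cons, List.cons_append, popA, if_neg hge]
        simp [List.takeWhile_cons, List.dropWhile_cons, hd]

theorem maxD_dropWhile_le (P : Int × Int → Bool) (l : List (Int × Int)) :
    maxD (l.dropWhile P) ≤ maxD l := by
  induction l with
  | nil => simp [List.dropWhile]
  | cons x l ih =>
      by_cases h : P x
      · simp [List.dropWhile, h, maxD]
        exact Or.inr ih
      · simp [List.dropWhile, h]

theorem dropWhile_head_not (P : Int × Int → Bool) (l : List (Int × Int)) (y : Int × Int)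
    (h : (l.dropWhile P).head? = some y) : P y = false := by
  induction l with
  | nil => simp [List.dropWhile] at h
  | cons x l ih =>
      by_cases hx : P x
      · simp only [List.dropWhile, hx] at h; exact ih h
      · simp only [List.dropWhile, hx] at h
        simp at h
        rw [← h]
        simpa using hx

theorem loopA_ref : ∀ (fuel : Nat) (l : List (Int × Int)) (rest : List Int) (t : Int) (ans : List Int),
    (∀ x ∈ l, 0 ≤ x.1 ∧ 1 ≤ x.2) → 0 ≤ t →
    (∀ y, l.head? = some y → t < dB y) →
    maxD l ≤ t + fuel →
    loopA fuel (l.map (fun x => x.1 + t * x.2)) (l.map Prod.snd ++ rest) ans = ans ++ ref l := by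
  intro fuel
  induction fuel with
  | zero =>
      intro l rest t ans hall ht hhead hfuel
      cases l with
      | nil => simp [loopA, ref]
      | cons y l' =>
          exfalso
          have h1 : t < dB y := hhead y (by simp)
          have h2 : dB y ≤ maxD (y :: l') := le_max_left _ _
          simp only [maxD] at hfuel
          omega
  | succ fuel ih =>
      intro l rest t ans hall ht hhead hfuel
      cases l with
      | nil => simp [loopA, ref]
      | cons x l' =>
          have hmem := hall x (by simp)
          have hiff : ∀ y ∈ x :: l', (100 ≤ y.1 + (t + 1) * y.2) ↔ dB y ≤ t + 1 :=
            fun y hy => days_iff y (t + 1) (hall y hy).1 (hall y hy).2 (by omega)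
          have hbump := bumpA_map t (x :: l') rest
          have hpop := popA_spec (t + 1) (x :: l') rest hiff
          have hhx : t < dB x := hhead x (by simp)
          simp only [List.map_cons, List.cons_append] at hbump hpop ⊢
          rw [loopA, hbump, hpop]
          by_cases hd : dB x ≤ t + 1
          · have heq : dB x = t + 1 := by omega
            simp only [List.takeWhile_cons, List.dropWhile_cons, hd, decide_true,
              if_true, List.length_cons]
            have hcnt : ((l'.takeWhile (fun y => decide (dB y ≤ t + 1))).length + 1 : Int) ≠ 0 := by
              positivity
            rw [if_pos (by exact_mod_cast hcnt)]
            rw [ih (l'.dropWhile (fun y => decide (dB y ≤ t + 1))) rest (t + 1) _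
              (fun y hy => hall y (List.mem_cons_of_mem _ ((List.dropWhile_sublist _).subset hy)))
              (by omega)
              (fun y hy => by
                have := dropWhile_head_not _ _ _ hy
                simp at this
                omega)
              (by
                have h1 : maxD (l'.dropWhile (fun y => decide (dB y ≤ t + 1))) ≤ maxD l' :=
                  maxD_dropWhile_le _ _
                have h2 : maxD l' ≤ max (dB x) (maxD l') := le_max_right _ _
                simp only [maxD] at hfuel
                omega)]
            rw [ref]
            simp only [heq]
            simp [List.append_assoc]
            push_cast
            ring
          · simp only [List.takeWhile_cons, List.dropWhile_cons, hd, decide_false,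
              if_false, List.length_nil]
            rw [if_neg (by simp)]
            exact ih (x :: l') rest (t + 1) ans hall (by omega)
              (fun y hy => by
                simp only [List.head?_cons, Option.some.injEq] at hy
                subst hy
                omega)
              (by simp only [maxD] at hfuel ⊢; omega)

theorem loopB_go : ∀ (l : List (Int × Int)) (a : Int) (ans : List Int) (cur : Int),
    loopB l (a :: ans) cur
      = ans.reverse ++ ((a + ((l.takeWhile (fun y => decide (dB y ≤ cur))).length : Int)) ::
          ref (l.dropWhile (fun y => decide (dB y ≤ cur)))) := by
  intro l
  induction l with
  | nil =>
      intro a ans cur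
      rw [loopB]
      simp only [List.takeWhile_nil, List.dropWhile_nil, List.length_nil, List.reverse_cons]
      rw [ref.eq_def]
      simp
  | cons x rest ih =>
      intro a ans cur
      rw [loopB]
      by_cases hlt : cur < dB x
      · have hlt' : cur < daysB x.1 x.2 := hlt
        rw [if_pos (Or.inr hlt')]
        rw [ih 1 (a :: ans) (daysB x.1 x.2)]
        have hP : ¬ dB x ≤ cur := by omega
        simp only [List.takeWhile_cons, List.dropWhile_cons, hP, decide_false,
          Bool.false_eq_true, if_false, List.length_nil, List.reverse_cons]
        rw [ref]
        simp only [dB, Nat.cast_zero, add_zero, List.append_assoc, List.singleton_append]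
        all_goals rfl
      · have hd : dB x ≤ cur := by omega
        rw [if_neg (by
          intro hc
          rcases hc with hc | hc
          · exact absurd hc (by simp)
          · exact hlt hc)]
        simp only [incHead]
        rw [ih (a + 1) ans cur]
        simp only [List.takeWhile_cons, List.dropWhile_cons, hd, decide_true, if_true,
          List.length_cons]
        congr 2
        push_cast
        ring

theorem alt_eq_ref (progresses speeds : List Int) :
    solution_alt progresses speeds = ref (progresses.zip speeds) := by
  unfold solution_alt
  cases hz : progresses.zip speeds with
  | nil => rw [loopB]; rw [ref]; simp
  | cons x rest =>
      rw [loopB]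
      rw [if_pos (Or.inl rfl)]
      rw [loopB_go rest 1 [] (daysB x.1 x.2)]
      rw [ref]
      simp only [dB, List.reverse_nil, List.nil_append, List.cons.injEq]
      exact ⟨rfl, rfl⟩

theorem zip_snd_append : ∀ (ps ss : List Int), ps.length ≤ ss.length →
    (ps.zip ss).map Prod.snd ++ ss.drop ps.length = ss := by
  intro ps
  induction ps with
  | nil => intro ss _; simp
  | cons p ps ih =>
      intro ss hlen
      cases ss with
      | nil => simp at hlen
      | cons s ss => simp only [List.zip_cons_cons, List.map_cons, List.cons_append,
          List.drop_succ_cons, List.length_cons]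
                     rw [ih ss (by simpa using hlen)]

theorem maxD_le_100 (l : List (Int × Int)) (h : ∀ x ∈ l, 0 ≤ x.1 ∧ 1 ≤ x.2) :
    maxD l ≤ 100 := by
  induction l with
  | nil => simp [maxD]
  | cons x l ih =>
      have hb := days_bounds x (h x (by simp)).1 (h x (by simp)).2
      simp only [maxD, max_le_iff]
      exact ⟨hb.2, ih (fun y hy => h y (by simp [hy]))⟩

-- ===== VERDICT (by name: the statement is the Claim_ definition above) =====
theorem solution_spec : Claim_equal_solution := by
  intro ps ss hdom hpre
  unfold Spec_solution
  obtain ⟨hlen, hall⟩ := hpre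
  unfold solution
  have hps : ps = (ps.zip ss).map (fun x => x.1 + 0 * x.2) := by
    have h1 : (ps.zip ss).map (fun x : Int × Int => x.1 + 0 * x.2) = (ps.zip ss).map Prod.fst := by
      simp
    rw [h1, List.map_fst_zip hlen]
  have hss : ss = (ps.zip ss).map Prod.snd ++ ss.drop ps.length :=
    (zip_snd_append ps ss hlen).symm
  have hstep : loopA 200 ps ss [] =
      loopA 200 ((ps.zip ss).map (fun x => x.1 + 0 * x.2))
        ((ps.zip ss).map Prod.snd ++ ss.drop ps.length) [] := by
    rw [← hps, ← hss]
  rw [hstep]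
  rw [loopA_ref 200 (ps.zip ss) (ss.drop ps.length) 0 [] hall (by omega)
    (fun y hy => by
      have hmem : y ∈ ps.zip ss := List.mem_of_mem_head? hy
      have := days_bounds y (hall y hmem).1 (hall y hmem).2
      omega)
    (by have := maxD_le_100 (ps.zip ss) hall; omega)]
  rw [alt_eq_ref]
  simp
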